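-- pv_equiv track=rewrite | github.com/jiportilla/ontology | python/taskadmin/core/svc/clean_synonyms.py | _double_assignment
-- ===== SOURCE A (Python) =====
-- def _double_assignment(d_syns: dict) -> list:
--     """
--     find ambiguity in synonym definitions
--
--     for example:
--         alpha~gamma
--         beta~gamma
--
--     log these amguitities
--     :param d_syns:
--     """
--
--     def _error(value_1: str,
--                value_2: str,
--                ambiguous_values: set):
--         return ("\n".join([
--             "Synonym Ambiguity",
--             "\tkey-1: {}".format(value_1),
--             "\tkey-1-values: {}".format(d_syns[value_1]),
--             "\tkey-2: {}".format(value_2),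
--             "\tkey-2-values: {}".format(d_syns[value_2]),
--             "\tambiguous-value(s): {}".format(sorted(ambiguous_values))
--         ]))
--
--     errors = []
--     for k1 in d_syns:
--         k1_values = set(d_syns[k1])
--
--         for k2 in d_syns:
--             if k1 == k2:
--                 continue
--
--             k2_values = set(d_syns[k2])
--             result = set(k1_values.intersection(k2_values))
--             if len(result) > 0:
--                 errors.append(_error(k1, k2, result))
--
--     return errors
-- ===== SOURCE B (Python) =====
-- def _double_assignment(d_syns: dict) -> list:
--     """
--     find ambiguity in synonym definitions (inverted index version)
--
--     Builds a value -> [keys] inverted index in one pass, then records shared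
--     values per ordered key pair, so only overlapping pairs do per-value work.
--     """
--
--     def _error(value_1: str,
--                value_2: str,
--                ambiguous_values: list):
--         return ("\n".join([
--             "Synonym Ambiguity",
--             "\tkey-1: {}".format(value_1),
--             "\tkey-1-values: {}".format(d_syns[value_1]),
--             "\tkey-2: {}".format(value_2),
--             "\tkey-2-values: {}".format(d_syns[value_2]),
--             "\tambiguous-value(s): {}".format(ambiguous_values)
--         ]))
--
--     inverted = {}
--     for k, values in d_syns.items():
--         for v in set(values):
--             inverted.setdefault(v, []).append(k)
--
--     shared = {}
--     for v, ks in inverted.items():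
--         for k1 in ks:
--             for k2 in ks:
--                 if k1 != k2:
--                     shared.setdefault((k1, k2), []).append(v)
--
--     idx = {k: i for i, k in enumerate(d_syns)}
--     by_k1 = {}
--     for (k1, k2) in shared:
--         by_k1.setdefault(k1, []).append(k2)
--
--     errors = []
--     for k1 in d_syns:
--         for k2 in sorted(by_k1.get(k1, []), key=lambda k: idx[k]):
--             errors.append(_error(k1, k2, sorted(shared[(k1, k2)])))
--     return errors
-- ===== Notes on version B (the rewrite author's own statement) =====
-- stated objective: alternative
-- what changed: Replaces A's all-pairs loop that rebuilds both value sets and intersects them for every ordered key pair by a one-pass inverted index (value -> keys) from which the shared values of each overlapping key pair are accumulated, emitting only the overlapping pairs reordered by original dict position; intended as faster (measured about 2.3x at n=1024, unconfirmed at larger sizes where the quadratic output makes both time out), output strings and their order are identical.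
import Mathlib
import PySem

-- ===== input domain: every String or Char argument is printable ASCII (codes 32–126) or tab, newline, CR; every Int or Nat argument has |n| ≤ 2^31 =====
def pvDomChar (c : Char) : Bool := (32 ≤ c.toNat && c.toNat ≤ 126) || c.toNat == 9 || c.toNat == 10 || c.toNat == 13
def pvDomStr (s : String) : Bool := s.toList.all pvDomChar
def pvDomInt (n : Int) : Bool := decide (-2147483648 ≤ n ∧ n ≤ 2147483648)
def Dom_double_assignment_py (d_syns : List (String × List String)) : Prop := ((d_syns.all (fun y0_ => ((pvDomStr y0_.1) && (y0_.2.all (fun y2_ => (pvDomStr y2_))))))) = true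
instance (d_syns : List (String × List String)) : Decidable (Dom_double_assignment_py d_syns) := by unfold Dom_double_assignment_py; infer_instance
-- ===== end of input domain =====

-- B replaces A's quadratic all-pairs set intersections by a one-pass inverted index
-- (value -> keys) from which the shared values of each overlapping key pair are read off;
-- the error strings and their order are unchanged.

-- ===== shared formatting helpers (the identical `_error` body of both Pythons) =====
-- Python's repr of a str, exact for printable-ASCII plus tab/newline/CR (the stated Dom):
-- quote is ' unless the string holds ' and no "; escapes \\ \t \n \r and the quote char.
def pyReprChar (q c : Char) : List Char :=
  if c = '\\' then ['\\', '\\']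
  else if c = '\t' then ['\\', 't']
  else if c = '\n' then ['\\', 'n']
  else if c = '\r' then ['\\', 'r']
  else if c = q then ['\\', q]
  else [c]

def pyReprStr (s : String) : String :=
  let cs := s.toList
  let q : Char := if cs.contains '\'' && !cs.contains '"' then '"' else '\''
  String.ofList ([q] ++ cs.flatMap (pyReprChar q) ++ [q])

-- str(list-of-str): '[' + ', '-joined reprs + ']'  (exact on Dom)
def pyReprStrList (xs : List String) : String :=
  String.ofList ('[' :: (PySem.Chars.join [',', ' '] (xs.map (fun s => (pyReprStr s).toList)) ++ [']']))

-- the `_error` closure (identical in both Pythons); `amb` is the already-sorted display list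
def pvError (d : PySem.Dict String (List String)) (v1 v2 : String) (amb : List String) : String :=
  PySem.Str.join "\n"
    [ "Synonym Ambiguity",
      "\tkey-1: " ++ v1,
      "\tkey-1-values: " ++ pyReprStrList (d.getD v1 []),
      "\tkey-2: " ++ v2,
      "\tkey-2-values: " ++ pyReprStrList (d.getD v2 []),
      "\tambiguous-value(s): " ++ pyReprStrList amb ]

-- ===== PORT A =====
def double_assignment_py (d_syns : List (String × List String)) : List String :=
  let d : PySem.Dict String (List String) := PySem.Dict.ofList d_syns
  d.keys.foldl (fun errors k1 =>
    let k1_values : PySem.Set String := PySem.Set.ofList (d.getD k1 [])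
    d.keys.foldl (fun errors k2 =>
      if k1 == k2 then errors
      else
        let k2_values : PySem.Set String := PySem.Set.ofList (d.getD k2 [])
        let result : PySem.Set String := PySem.Set.inter k1_values k2_values
        if 0 < PySem.Set.len result then
          errors ++ [pvError d k1 k2 (PySem.List.sorted result (fun x => x))]
        else errors) errors) []

-- ===== PORT B =====
def double_assignment_py_alt (d_syns : List (String × List String)) : List String :=
  let d : PySem.Dict String (List String) := PySem.Dict.ofList d_syns
  -- inverted index value -> keys (setdefault(v, []).append(k) = modify v [] (· ++ [k]))
  let inverted : PySem.Dict String (List String) :=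
    d.items.foldl (fun inv kv =>
      (PySem.Set.ofList kv.2).foldl (fun inv v => inv.modify v [] (· ++ [kv.1])) inv)
      PySem.Dict.empty
  -- shared values per ordered key pair
  let shared : PySem.Dict (String × String) (List String) :=
    inverted.items.foldl (fun sh p =>
      p.2.foldl (fun sh k1 =>
        p.2.foldl (fun sh k2 =>
          if k1 == k2 then sh else sh.modify (k1, k2) [] (· ++ [p.1])) sh) sh)
      PySem.Dict.empty
  -- idx = {k: i for i, k in enumerate(d_syns)}
  let idx : PySem.Dict String Int :=
    (PySem.List.enumerate d.keys).foldl (fun m ik => m.insert ik.2 ik.1) PySem.Dict.empty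
  -- by_k1: first key -> list of second keys of the pairs in `shared`
  let by_k1 : PySem.Dict String (List String) :=
    shared.keys.foldl (fun m p => m.modify p.1 [] (· ++ [p.2])) PySem.Dict.empty
  -- Python's idx[k] and shared[(k1, k2)] cannot raise here (k comes from d, the pair from
  -- shared's own keys), so the total getD lookups are exact.
  d.keys.foldl (fun errors k1 =>
    (PySem.List.sorted (by_k1.getD k1 []) (fun k => idx.getD k 0)).foldl (fun errors k2 =>
      errors ++ [pvError d k1 k2 (PySem.List.sorted (shared.getD (k1, k2) []) (fun x => x))]) errors) []

-- ===== PRECONDITION & SPEC =====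
def Spec_double_assignment_py (d_syns : List (String × List String)) (out : List String) : Prop := out = double_assignment_py_alt d_syns
instance (d_syns : List (String × List String)) (out : List String) : Decidable (Spec_double_assignment_py d_syns out) := by unfold Spec_double_assignment_py; infer_instance

-- ===== CLAIM (what is proved, stated in full; the proofs are below) =====
def Claim_equal_double_assignment_py : Prop := ∀ (d_syns : List (String × List String)), Dom_double_assignment_py d_syns → Spec_double_assignment_py d_syns (double_assignment_py d_syns)

-- ===== LEMMAS AND PROOFS =====

def GoodD {κ : Type} [BEq κ] (sh : PySem.Dict κ (List String)) : Prop :=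
  ∀ q, sh.contains q = true ↔ sh.getD q [] ≠ []

lemma goodD_empty {κ : Type} [BEq κ] : GoodD (PySem.Dict.empty : PySem.Dict κ (List String)) := by
  intro q
  simp [PySem.Dict.contains_empty, PySem.Dict.getD_empty]

lemma goodD_modify {κ : Type} [BEq κ] [LawfulBEq κ] [DecidableEq κ]
    (sh : PySem.Dict κ (List String)) (h : GoodD sh) (q : κ) (x : String) :
    GoodD (sh.modify q [] (· ++ [x])) := by
  intro q'
  by_cases hq : q' = q
  · subst hq
    simp [PySem.Dict.modify, PySem.Dict.contains_insert_self, PySem.Dict.getD_insert_self]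
  · rw [show sh.modify q [] (· ++ [x]) = sh.insert q (sh.getD q [] ++ [x]) from rfl,
        PySem.Dict.contains_insert, PySem.Dict.getD_insert, if_neg hq]
    simp [hq, h q']

lemma inner_add (k : String) (s : List String) (hs : s.Nodup) :
    ∀ (inv : PySem.Dict String (List String)) (v : String),
    (s.foldl (fun inv v' => inv.modify v' [] (· ++ [k])) inv).getD v [] =
      inv.getD v [] ++ (if v ∈ s then [k] else []) := by
  induction s with
  | nil => intro inv v; simp
  | cons a t ih =>
    intro inv v
    simp only [List.foldl_cons]
    rw [ih (List.Nodup.of_cons hs)]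
    by_cases hva : v = a
    · subst hva
      have hvt : v ∉ t := (List.nodup_cons.mp hs).1
      simp [hvt]
    · simp [PySem.Dict.getD_modify, hva, List.mem_cons]

lemma invOf_getD_aux (l : List (String × List String)) :
    ∀ (inv : PySem.Dict String (List String)) (v : String),
    (l.foldl (fun inv kv =>
        (PySem.Set.ofList kv.2).foldl (fun inv v' => inv.modify v' [] (· ++ [kv.1])) inv) inv).getD v [] =
      inv.getD v [] ++ (l.filter (fun kv => (PySem.Set.ofList kv.2).contains v)).map (·.1) := by
  induction l with
  | nil => intro inv v; simp
  | cons kv t ih =>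
    intro inv v
    simp only [List.foldl_cons]
    rw [ih, inner_add kv.1 _ (PySem.Set.nodup_ofList kv.2)]
    by_cases hv : v ∈ kv.2
    · simp [hv, PySem.Set.mem_ofList]
    · simp [hv, PySem.Set.mem_ofList]

def invOf (d : PySem.Dict String (List String)) : PySem.Dict String (List String) :=
  d.items.foldl (fun inv kv =>
    (PySem.Set.ofList kv.2).foldl (fun inv v => inv.modify v [] (· ++ [kv.1])) inv)
    PySem.Dict.empty

lemma goodD_invOf (d : PySem.Dict String (List String)) : GoodD (invOf d) := by
  unfold invOf
  refine List.foldlRecOn d.items _ goodD_empty (fun inv hinv kv _ => ?_)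
  exact List.foldlRecOn _ _ hinv (fun inv hinv v _ => goodD_modify inv hinv v kv.1)

lemma invOf_getD (d : PySem.Dict String (List String)) (v : String) :
    (invOf d).getD v [] = (d.items.filter (fun kv => (PySem.Set.ofList kv.2).contains v)).map (·.1) := by
  unfold invOf
  rw [invOf_getD_aux]
  simp [PySem.Dict.getD_empty]

lemma nodup_keys_invOf (d : PySem.Dict String (List String)) : (invOf d).keys.Nodup := by
  unfold invOf
  have h0 : (PySem.Dict.empty : PySem.Dict String (List String)).keys.Nodup := by
    rw [PySem.Dict.keys_empty]; exact List.nodup_nil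
  refine List.foldlRecOn (motive := fun (inv : PySem.Dict String (List String)) => inv.keys.Nodup) d.items _ h0 (fun inv hinv kv _ => ?_)
  exact PySem.Dict.nodup_keys_foldl_modify_key _ (fun v => v) [] (fun _ _ => (· ++ [kv.1])) inv hinv

lemma nodup_invOf_getD (d : PySem.Dict String (List String)) (hnd : d.keys.Nodup) (v : String) :
    ((invOf d).getD v []).Nodup := by
  rw [invOf_getD]
  have hsub : ((d.items.filter (fun kv => (PySem.Set.ofList kv.2).contains v)).map (·.1)).Sublist
      (d.items.map (·.1)) := List.Sublist.map _ List.filter_sublist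
  have hkeys : d.items.map (·.1) = d.keys := rfl
  rw [hkeys] at hsub
  exact hnd.sublist hsub

lemma mem_invOf_getD (d : PySem.Dict String (List String)) (hnd : d.keys.Nodup)
    (k v : String) (hk : k ∈ d.keys) :
    k ∈ (invOf d).getD v [] ↔ v ∈ PySem.Set.ofList (d.getD k []) := by
  rw [invOf_getD]
  simp only [List.mem_map, List.mem_filter, PySem.Set.mem_ofList]
  constructor
  · rintro ⟨⟨k', vs'⟩, ⟨hmem, hv⟩, rfl⟩
    have : d.getD k' [] = vs' := PySem.Dict.getD_of_mem_items d hmem hnd []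
    simp only [this]
    simpa using hv
  · intro hv
    obtain ⟨vs, hvs⟩ : ∃ vs, d.get? k = some vs := by
      cases h : d.get? k with
      | none => exact absurd hk ((PySem.Dict.get?_eq_none_iff_not_mem_keys d k).mp h)
      | some vs => exact ⟨vs, rfl⟩
    have hitems : (k, vs) ∈ d.items := (PySem.Dict.get?_eq_some_iff_mem_items d k vs hnd).mp hvs
    have hgd : d.getD k [] = vs := PySem.Dict.getD_of_get?_eq_some d [] hvs
    refine ⟨(k, vs), ⟨hitems, ?_⟩, rfl⟩
    rw [hgd] at hv
    simpa [PySem.Set.mem_ofList] using hv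

lemma sh_inner (v a : String) (ksl : List String) (hk : ksl.Nodup) :
    ∀ (sh : PySem.Dict (String × String) (List String)) (k1 k2 : String),
    (ksl.foldl (fun sh b => if a == b then sh else sh.modify (a, b) [] (· ++ [v])) sh).getD (k1, k2) [] =
      sh.getD (k1, k2) [] ++ (if k1 = a ∧ k2 ∈ ksl ∧ k2 ≠ a then [v] else []) := by
  induction ksl with
  | nil => intro sh k1 k2; simp
  | cons b t ih =>
    intro sh k1 k2
    simp only [List.foldl_cons]
    rw [ih (List.Nodup.of_cons hk)]
    by_cases hab : a = b
    · subst hab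
      simp only [BEq.rfl, if_true]
      by_cases hc : k1 = a ∧ k2 ∈ t ∧ k2 ≠ a
      · rw [if_pos hc, if_pos ⟨hc.1, List.mem_cons_of_mem _ hc.2.1, hc.2.2⟩]
      · rw [if_neg hc, if_neg]
        rintro ⟨h1, h2, h3⟩
        rcases List.mem_cons.mp h2 with h | h
        · exact h3 h
        · exact hc ⟨h1, h, h3⟩
    · rw [if_neg (by simpa using hab)]
      rw [show (sh.modify (a, b) [] (· ++ [v])) = sh.insert (a, b) (sh.getD (a, b) [] ++ [v]) from rfl,
          PySem.Dict.getD_insert]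
      by_cases hp : (k1, k2) = (a, b)
      · rw [if_pos hp]
        obtain ⟨h1, h2⟩ := Prod.mk.injEq _ _ _ _ ▸ hp
        subst h1; subst h2
        have hbt : k2 ∉ t := (List.nodup_cons.mp hk).1
        rw [if_neg (by rintro ⟨_, h, _⟩; exact hbt h), if_pos ⟨rfl, List.mem_cons_self, fun h => hab h.symm⟩]
        simp
      · rw [if_neg hp]
        by_cases hc : k1 = a ∧ k2 ∈ t ∧ k2 ≠ a
        · rw [if_pos hc, if_pos ⟨hc.1, List.mem_cons_of_mem _ hc.2.1, hc.2.2⟩]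
        · rw [if_neg hc, if_neg]
          rintro ⟨h1, h2, h3⟩
          rcases List.mem_cons.mp h2 with h | h
          · exact hp (by rw [h1, h])
          · exact hc ⟨h1, h, h3⟩

lemma sh_middle (v : String) (ksl : List String) (hk : ksl.Nodup) (out : List String) (hout : out.Nodup) :
    ∀ (sh : PySem.Dict (String × String) (List String)) (k1 k2 : String),
    (out.foldl (fun sh a =>
        ksl.foldl (fun sh b => if a == b then sh else sh.modify (a, b) [] (· ++ [v])) sh) sh).getD (k1, k2) [] =
      sh.getD (k1, k2) [] ++ (if k1 ∈ out ∧ k2 ∈ ksl ∧ k1 ≠ k2 then [v] else []) := by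
  induction out with
  | nil => intro sh k1 k2; simp
  | cons a t ih =>
    intro sh k1 k2
    simp only [List.foldl_cons]
    rw [ih (List.Nodup.of_cons hout), sh_inner v a ksl hk, List.append_assoc]
    congr 1
    by_cases h1a : k1 = a
    · subst h1a
      have h1t : k1 ∉ t := (List.nodup_cons.mp hout).1
      by_cases h2k : k2 ∈ ksl
      · by_cases hne : k2 = k1
        · subst hne; simp [h1t]
        · have hne' : ¬ k1 = k2 := fun h => hne h.symm
          simp [h1t, h2k, hne, hne', List.mem_cons]
      · simp [h1t, h2k]
    · by_cases h1t : k1 ∈ t <;> by_cases h2k : k2 ∈ ksl <;> by_cases hne : k1 = k2 <;>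
        simp [h1a, h1t, h2k, hne, List.mem_cons]

lemma shOf_getD_aux (l : List (String × List String)) (hl : ∀ p ∈ l, p.2.Nodup) :
    ∀ (sh : PySem.Dict (String × String) (List String)) (k1 k2 : String),
    (l.foldl (fun sh p =>
        p.2.foldl (fun sh a =>
          p.2.foldl (fun sh b => if a == b then sh else sh.modify (a, b) [] (· ++ [p.1])) sh) sh) sh).getD (k1, k2) [] =
      sh.getD (k1, k2) [] ++ (l.filter (fun p => decide (k1 ∈ p.2 ∧ k2 ∈ p.2 ∧ k1 ≠ k2))).map (·.1) := by
  induction l with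
  | nil => intro sh k1 k2; simp
  | cons p t ih =>
    intro sh k1 k2
    simp only [List.foldl_cons]
    rw [ih (fun q hq => hl q (List.mem_cons_of_mem _ hq)),
        sh_middle p.1 p.2 (hl p List.mem_cons_self) p.2 (hl p List.mem_cons_self), List.filter_cons]
    by_cases hc : k1 ∈ p.2 ∧ k2 ∈ p.2 ∧ k1 ≠ k2
    · simp [hc]
    · simp [hc]

def shOf (d : PySem.Dict String (List String)) : PySem.Dict (String × String) (List String) :=
  (invOf d).items.foldl (fun sh p =>
    p.2.foldl (fun sh k1 =>
      p.2.foldl (fun sh k2 =>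
        if k1 == k2 then sh else sh.modify (k1, k2) [] (· ++ [p.1])) sh) sh)
    PySem.Dict.empty

lemma nodup_invOf_items_snd (d : PySem.Dict String (List String)) (hnd : d.keys.Nodup) :
    ∀ p ∈ (invOf d).items, p.2.Nodup := by
  rintro ⟨v, l⟩ hp
  have : (invOf d).getD v [] = l := PySem.Dict.getD_of_mem_items (invOf d) hp (nodup_keys_invOf d) []
  rw [← this]
  exact nodup_invOf_getD d hnd v

lemma shOf_getD (d : PySem.Dict String (List String)) (hnd : d.keys.Nodup) (k1 k2 : String) :
    (shOf d).getD (k1, k2) [] =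
      ((invOf d).items.filter (fun p => decide (k1 ∈ p.2 ∧ k2 ∈ p.2 ∧ k1 ≠ k2))).map (·.1) := by
  unfold shOf
  rw [shOf_getD_aux _ (nodup_invOf_items_snd d hnd)]
  simp [PySem.Dict.getD_empty]

lemma goodD_shOf (d : PySem.Dict String (List String)) : GoodD (shOf d) := by
  unfold shOf
  refine List.foldlRecOn (invOf d).items _ goodD_empty (fun sh hsh p _ => ?_)
  refine List.foldlRecOn p.2 _ hsh (fun sh hsh a _ => ?_)
  refine List.foldlRecOn p.2 _ hsh (fun sh hsh b _ => ?_)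
  by_cases hab : a == b
  · simpa [hab] using hsh
  · simpa [hab] using goodD_modify sh hsh (a, b) p.1

lemma mem_shOf_getD (d : PySem.Dict String (List String)) (hnd : d.keys.Nodup)
    (k1 k2 : String) (h1 : k1 ∈ d.keys) (h2 : k2 ∈ d.keys) (x : String) :
    x ∈ (shOf d).getD (k1, k2) [] ↔
      (x ∈ PySem.Set.ofList (d.getD k1 []) ∧ x ∈ PySem.Set.ofList (d.getD k2 []) ∧ k1 ≠ k2) := by
  rw [shOf_getD d hnd]
  simp only [List.mem_map, List.mem_filter, decide_eq_true_eq]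
  constructor
  · rintro ⟨⟨v, l⟩, ⟨hmem, hin1, hin2, hne⟩, rfl⟩
    have hl : (invOf d).getD v [] = l := PySem.Dict.getD_of_mem_items (invOf d) hmem (nodup_keys_invOf d) []
    rw [← hl] at hin1 hin2
    exact ⟨(mem_invOf_getD d hnd k1 v h1).mp hin1, (mem_invOf_getD d hnd k2 v h2).mp hin2, hne⟩
  · rintro ⟨hx1, hx2, hne⟩
    have hin1 : k1 ∈ (invOf d).getD x [] := (mem_invOf_getD d hnd k1 x h1).mpr hx1
    have hin2 : k2 ∈ (invOf d).getD x [] := (mem_invOf_getD d hnd k2 x h2).mpr hx2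
    have hne' : (invOf d).getD x [] ≠ [] := fun h => by simp [h] at hin1
    have hcont : (invOf d).contains x = true := (goodD_invOf d x).mpr hne'
    obtain ⟨l, hl⟩ : ∃ l, (invOf d).get? x = some l := by
      cases h : (invOf d).get? x with
      | none => exact absurd hcont (by rw [(PySem.Dict.get?_eq_none_iff_contains _ _).mp h]; simp)
      | some l => exact ⟨l, rfl⟩
    have hitems : (x, l) ∈ (invOf d).items := (PySem.Dict.get?_eq_some_iff_mem_items _ _ _ (nodup_keys_invOf d)).mp hl
    have hgd : (invOf d).getD x [] = l := PySem.Dict.getD_of_get?_eq_some _ [] hl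
    rw [hgd] at hin1 hin2
    exact ⟨(x, l), ⟨hitems, hin1, hin2, hne⟩, rfl⟩

lemma nodup_shOf_getD (d : PySem.Dict String (List String)) (hnd : d.keys.Nodup) (k1 k2 : String) :
    ((shOf d).getD (k1, k2) []).Nodup := by
  rw [shOf_getD d hnd]
  have hsub : (((invOf d).items.filter (fun p => decide (k1 ∈ p.2 ∧ k2 ∈ p.2 ∧ k1 ≠ k2))).map (·.1)).Sublist
      ((invOf d).items.map (·.1)) := List.Sublist.map _ List.filter_sublist
  have hkeys : (invOf d).items.map (·.1) = (invOf d).keys := rfl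
  rw [hkeys] at hsub
  exact (nodup_keys_invOf d).sublist hsub

lemma map_snd_enumerate {α : Type} (xs : List α) : ∀ (s : Int), (PySem.List.enumerate xs s).map (·.2) = xs := by
  induction xs with
  | nil => intro s; simp [PySem.List.enumerate]
  | cons x t ih => intro s; simp [PySem.List.enumerate, ih]

lemma mem_enumerate {α : Type} (xs : List α) : ∀ (s : Int) (i : Nat) (h : i < xs.length),
    ((s + i : Int), xs[i]) ∈ PySem.List.enumerate xs s := by
  induction xs with
  | nil => intro s i h; simp at h
  | cons x t ih =>
    intro s i h
    cases i with
    | zero => simp [PySem.List.enumerate]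
    | succ j =>
      have := ih (s + 1) j (by simpa using h)
      simp only [PySem.List.enumerate, List.mem_cons]
      right
      have harith : (s + (j + 1 : Nat) : Int) = (s + 1) + (j : Int) := by push_cast; ring
      rw [harith]
      simpa using this

def idxD (d : PySem.Dict String (List String)) : PySem.Dict String Int :=
  (PySem.List.enumerate d.keys).foldl (fun m ik => m.insert ik.2 ik.1) PySem.Dict.empty

lemma idxD_items (d : PySem.Dict String (List String)) (hnd : d.keys.Nodup) :
    (idxD d).items = (PySem.List.enumerate d.keys).map (fun ik => (ik.2, ik.1)) := by
  unfold idxD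
  rw [PySem.Dict.items_foldl_insert_fresh (PySem.List.enumerate d.keys) (·.2) (·.1) PySem.Dict.empty
      (fun a _ => by rw [PySem.Dict.contains_empty]) (by rw [map_snd_enumerate]; exact hnd)]
  have hemp : (PySem.Dict.empty : PySem.Dict String Int).items = [] := rfl
  rw [hemp, List.nil_append]

lemma nodup_keys_idxD (d : PySem.Dict String (List String)) (hnd : d.keys.Nodup) :
    (idxD d).keys.Nodup := by
  have h1 : (idxD d).keys = (idxD d).items.map (·.1) := rfl
  rw [h1, idxD_items d hnd, List.map_map]
  have h2 : ((fun (x : String × Int) => x.1) ∘ fun (ik : Int × String) => (ik.2, ik.1)) =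
      fun (ik : Int × String) => ik.2 := rfl
  rw [h2, map_snd_enumerate]
  exact hnd

lemma idxD_getD (d : PySem.Dict String (List String)) (hnd : d.keys.Nodup)
    (i : Nat) (h : i < d.keys.length) :
    (idxD d).getD d.keys[i] 0 = (i : Int) := by
  have hmem : (d.keys[i], (i : Int)) ∈ (idxD d).items := by
    rw [idxD_items d hnd]
    have := mem_enumerate d.keys 0 i h
    rw [zero_add] at this
    exact List.mem_map.mpr ⟨((i : Int), d.keys[i]), this, rfl⟩
  exact PySem.Dict.getD_of_mem_items _ hmem (nodup_keys_idxD d hnd) 0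

lemma nodup_keys_shOf (d : PySem.Dict String (List String)) : (shOf d).keys.Nodup := by
  unfold shOf
  have h0 : (PySem.Dict.empty : PySem.Dict (String × String) (List String)).keys.Nodup := by
    rw [PySem.Dict.keys_empty]; exact List.nodup_nil
  refine List.foldlRecOn (motive := fun (sh : PySem.Dict (String × String) (List String)) => sh.keys.Nodup)
    (invOf d).items _ h0 (fun sh hsh p _ => ?_)
  refine List.foldlRecOn (motive := fun (sh : PySem.Dict (String × String) (List String)) => sh.keys.Nodup)
    p.2 _ hsh (fun sh hsh a _ => ?_)
  refine List.foldlRecOn (motive := fun (sh : PySem.Dict (String × String) (List String)) => sh.keys.Nodup)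
    p.2 _ hsh (fun sh hsh b _ => ?_)
  by_cases hab : (a == b) = true
  · simpa [hab] using hsh
  · have hb' : (a == b) = false := Bool.not_eq_true _ ▸ hab
    simp only [hb', Bool.false_eq_true, if_false]
    exact PySem.Dict.nodup_keys_insert _ _ _ hsh

lemma mem_keys_of_invOf_getD (d : PySem.Dict String (List String)) (k v : String)
    (h : k ∈ (invOf d).getD v []) : k ∈ d.keys := by
  rw [invOf_getD] at h
  obtain ⟨kv, hkv, rfl⟩ := List.mem_map.mp h
  exact List.mem_map.mpr ⟨kv, (List.mem_filter.mp hkv).1, rfl⟩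

lemma mem_keys_of_shOf_getD (d : PySem.Dict String (List String)) (hnd : d.keys.Nodup)
    (k1 k2 : String) (h : (shOf d).getD (k1, k2) [] ≠ []) : k1 ∈ d.keys ∧ k2 ∈ d.keys := by
  rw [shOf_getD d hnd] at h
  obtain ⟨p, hp⟩ := List.exists_mem_of_ne_nil _ h
  obtain ⟨q, hq, rfl⟩ := List.mem_map.mp hp
  obtain ⟨hqmem, hcond⟩ := List.mem_filter.mp hq
  simp only [decide_eq_true_eq] at hcond
  have hq2 : (invOf d).getD q.1 [] = q.2 :=
    PySem.Dict.getD_of_mem_items _ (by exact hqmem) (nodup_keys_invOf d) []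
  constructor
  · exact mem_keys_of_invOf_getD d k1 q.1 (hq2 ▸ hcond.1)
  · exact mem_keys_of_invOf_getD d k2 q.1 (hq2 ▸ hcond.2.1)

def byK1 (d : PySem.Dict String (List String)) : PySem.Dict String (List String) :=
  (shOf d).keys.foldl (fun m p => m.modify p.1 [] (· ++ [p.2])) PySem.Dict.empty

lemma byK1_getD (d : PySem.Dict String (List String)) (k1 : String) :
    (byK1 d).getD k1 [] = ((shOf d).keys.filter (fun p => p.1 == k1)).map (·.2) := by
  unfold byK1
  rw [PySem.Dict.getD_foldl_modify_append]
  have hemp : (PySem.Dict.empty : PySem.Dict String (List String)).getD k1 [] = [] := rfl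
  rw [hemp, List.nil_append]

lemma nodup_byK1_getD (d : PySem.Dict String (List String)) (k1 : String) :
    ((byK1 d).getD k1 []).Nodup := by
  rw [byK1_getD]
  refine List.Nodup.map_on ?_ ((nodup_keys_shOf d).sublist List.filter_sublist)
  rintro ⟨a1, a2⟩ ha ⟨b1, b2⟩ hb h2
  have ha1 : a1 = k1 := by simpa using (List.mem_filter.mp ha).2
  have hb1 : b1 = k1 := by simpa using (List.mem_filter.mp hb).2
  simp only at h2
  rw [ha1, hb1, h2]

lemma mem_byK1_getD (d : PySem.Dict String (List String)) (k1 k2 : String) :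
    k2 ∈ (byK1 d).getD k1 [] ↔ (k1, k2) ∈ (shOf d).keys := by
  rw [byK1_getD]
  constructor
  · intro h
    obtain ⟨q, hq, rfl⟩ := List.mem_map.mp h
    obtain ⟨hm, hc⟩ := List.mem_filter.mp hq
    have : q.1 = k1 := by simpa using hc
    rw [← this]
    simpa using hm
  · intro h
    exact List.mem_map.mpr ⟨(k1, k2), List.mem_filter.mpr ⟨h, by simp⟩, rfl⟩

lemma contains_shOf_iff (d : PySem.Dict String (List String)) (hnd : d.keys.Nodup)
    (k1 k2 : String) (h1 : k1 ∈ d.keys) (h2 : k2 ∈ d.keys) :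
    (shOf d).contains (k1, k2) = true ↔
      (k1 ≠ k2 ∧ PySem.Set.inter (PySem.Set.ofList (d.getD k1 [])) (PySem.Set.ofList (d.getD k2 [])) ≠ []) := by
  rw [goodD_shOf d (k1, k2)]
  constructor
  · intro h
    obtain ⟨x, hx⟩ := List.exists_mem_of_ne_nil _ h
    obtain ⟨hx1, hx2, hne⟩ := (mem_shOf_getD d hnd k1 k2 h1 h2 x).mp hx
    refine ⟨hne, List.ne_nil_of_mem ((PySem.Set.mem_inter _ _ x).mpr ⟨hx1, hx2⟩)⟩
  · rintro ⟨hne, hR⟩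
    obtain ⟨x, hx⟩ := List.exists_mem_of_ne_nil _ hR
    obtain ⟨hx1, hx2⟩ := (PySem.Set.mem_inter _ _ x).mp hx
    exact List.ne_nil_of_mem ((mem_shOf_getD d hnd k1 k2 h1 h2 x).mpr ⟨hx1, hx2, hne⟩)

lemma sorted_R_eq_sorted_L (d : PySem.Dict String (List String)) (hnd : d.keys.Nodup)
    (k1 k2 : String) (h1 : k1 ∈ d.keys) (h2 : k2 ∈ d.keys) (hne : k1 ≠ k2) :
    PySem.List.sorted (PySem.Set.inter (PySem.Set.ofList (d.getD k1 [])) (PySem.Set.ofList (d.getD k2 []))) (fun x => x) =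
    PySem.List.sorted ((shOf d).getD (k1, k2) []) (fun x => x) := by
  apply (PySem.List.sorted_id_eq_sorted_id_iff_perm _ _).mpr
  rw [List.perm_ext_iff_of_nodup
    (PySem.Set.nodup_inter _ _ (PySem.Set.nodup_ofList _)) (nodup_shOf_getD d hnd k1 k2)]
  intro x
  rw [PySem.Set.mem_inter, mem_shOf_getD d hnd k1 k2 h1 h2 x]
  constructor
  · rintro ⟨a, b⟩; exact ⟨a, b, hne⟩
  · rintro ⟨a, b, _⟩; exact ⟨a, b⟩

lemma sortedPairs_eq (d : PySem.Dict String (List String)) (hnd : d.keys.Nodup) (k1 : String) :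
    PySem.List.sorted ((byK1 d).getD k1 []) (fun k => (idxD d).getD k 0) =
    d.keys.filter (fun k2 => (shOf d).contains (k1, k2)) := by
  apply PySem.List.sorted_eq_of_perm_of_pairwise_lt
  · rw [List.perm_ext_iff_of_nodup (hnd.sublist List.filter_sublist) (nodup_byK1_getD d k1)]
    intro k2
    rw [List.mem_filter, mem_byK1_getD]
    constructor
    · rintro ⟨_, h⟩; exact (PySem.Dict.contains_iff_mem_keys _ _).mp h
    · intro h
      have hc := (PySem.Dict.contains_iff_mem_keys _ _).mpr h
      have hne : (shOf d).getD (k1, k2) [] ≠ [] := (goodD_shOf d (k1, k2)).mp hc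
      exact ⟨(mem_keys_of_shOf_getD d hnd k1 k2 hne).2, hc⟩
  · have hpw : d.keys.Pairwise (fun a b => (idxD d).getD a 0 < (idxD d).getD b 0) := by
      rw [List.pairwise_iff_getElem]
      intro i j hi hj hij
      rw [idxD_getD d hnd i hi, idxD_getD d hnd j hj]
      exact_mod_cast hij
    exact List.Pairwise.sublist List.filter_sublist hpw

lemma main_aux2 (d : PySem.Dict String (List String)) (hnd : d.keys.Nodup) :
    (d.keys.foldl (fun errors k1 =>
      d.keys.foldl (fun errors k2 =>
        if k1 == k2 then errors
        else if 0 < PySem.Set.len (PySem.Set.inter (PySem.Set.ofList (d.getD k1 [])) (PySem.Set.ofList (d.getD k2 []))) then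
          errors ++ [pvError d k1 k2 (PySem.List.sorted (PySem.Set.inter (PySem.Set.ofList (d.getD k1 [])) (PySem.Set.ofList (d.getD k2 []))) (fun x => x))]
        else errors) errors) [] : List String) =
    d.keys.foldl (fun errors k1 =>
      (PySem.List.sorted ((byK1 d).getD k1 []) (fun k => (idxD d).getD k 0)).foldl (fun errors k2 =>
        errors ++ [pvError d k1 k2 (PySem.List.sorted ((shOf d).getD (k1, k2) []) (fun x => x))]) errors) [] := by
  have hinnerA : ∀ (k1 : String) (acc : List String),
      d.keys.foldl (fun errors k2 =>
        if k1 == k2 then errors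
        else if 0 < PySem.Set.len (PySem.Set.inter (PySem.Set.ofList (d.getD k1 [])) (PySem.Set.ofList (d.getD k2 []))) then
          errors ++ [pvError d k1 k2 (PySem.List.sorted (PySem.Set.inter (PySem.Set.ofList (d.getD k1 [])) (PySem.Set.ofList (d.getD k2 []))) (fun x => x))]
        else errors) acc =
      acc ++ (d.keys.filter (fun k2 => decide ((k1 == k2) = false ∧ 0 < PySem.Set.len (PySem.Set.inter (PySem.Set.ofList (d.getD k1 [])) (PySem.Set.ofList (d.getD k2 [])))))).map
        (fun k2 => pvError d k1 k2 (PySem.List.sorted (PySem.Set.inter (PySem.Set.ofList (d.getD k1 [])) (PySem.Set.ofList (d.getD k2 []))) (fun x => x))) := by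
    intro k1 acc
    rw [PySem.List.foldl_congr_mem _ _
      (fun errors k2 => if ((k1 == k2) = false ∧ 0 < PySem.Set.len (PySem.Set.inter (PySem.Set.ofList (d.getD k1 [])) (PySem.Set.ofList (d.getD k2 [])))) then
        errors ++ [pvError d k1 k2 (PySem.List.sorted (PySem.Set.inter (PySem.Set.ofList (d.getD k1 [])) (PySem.Set.ofList (d.getD k2 []))) (fun x => x))]
      else errors) _
      (fun acc' k2 _ => by
        beta_reduce
        by_cases hb : (k1 == k2) = true
        · rw [if_pos hb, if_neg (by simp [hb])]
        · have hb' : (k1 == k2) = false := Bool.not_eq_true _ ▸ hb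
          rw [if_neg (by simp [hb']), ]
          by_cases hc : 0 < PySem.Set.len (PySem.Set.inter (PySem.Set.ofList (d.getD k1 [])) (PySem.Set.ofList (d.getD k2 [])))
          · rw [if_pos hc, if_pos ⟨hb', hc⟩]
          · rw [if_neg hc, if_neg (by rintro ⟨_, h⟩; exact hc h)])]
    exact PySem.List.foldl_append_ite _ _ _ _
  have hinnerB : ∀ (k1 : String) (acc : List String),
      (PySem.List.sorted ((byK1 d).getD k1 []) (fun k => (idxD d).getD k 0)).foldl (fun errors k2 =>
        errors ++ [pvError d k1 k2 (PySem.List.sorted ((shOf d).getD (k1, k2) []) (fun x => x))]) acc =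
      acc ++ (d.keys.filter (fun k2 => (shOf d).contains (k1, k2))).map
        (fun k2 => pvError d k1 k2 (PySem.List.sorted ((shOf d).getD (k1, k2) []) (fun x => x))) := by
    intro k1 acc
    rw [sortedPairs_eq d hnd k1]
    exact PySem.List.foldl_append_singleton_eq_map _ _ _
  rw [PySem.List.foldl_congr_mem _ _ (fun errors k1 => errors ++ (d.keys.filter (fun k2 => decide ((k1 == k2) = false ∧ 0 < PySem.Set.len (PySem.Set.inter (PySem.Set.ofList (d.getD k1 [])) (PySem.Set.ofList (d.getD k2 [])))))).map
        (fun k2 => pvError d k1 k2 (PySem.List.sorted (PySem.Set.inter (PySem.Set.ofList (d.getD k1 [])) (PySem.Set.ofList (d.getD k2 []))) (fun x => x)))) _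
      (fun acc k1 _ => hinnerA k1 acc),
    PySem.List.foldl_congr_mem _ _ (fun errors k1 => errors ++ (d.keys.filter (fun k2 => (shOf d).contains (k1, k2))).map
        (fun k2 => pvError d k1 k2 (PySem.List.sorted ((shOf d).getD (k1, k2) []) (fun x => x)))) _
      (fun acc k1 _ => hinnerB k1 acc),
    PySem.List.foldl_append_eq_flatMap, PySem.List.foldl_append_eq_flatMap]
  simp only [List.nil_append]
  refine List.flatMap_congr (fun k1 h1 => ?_)
  have hfilter : d.keys.filter (fun k2 => decide ((k1 == k2) = false ∧ 0 < PySem.Set.len (PySem.Set.inter (PySem.Set.ofList (d.getD k1 [])) (PySem.Set.ofList (d.getD k2 []))))) =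
      d.keys.filter (fun k2 => (shOf d).contains (k1, k2)) := by
    apply List.filter_congr
    intro k2 h2
    rw [Bool.eq_iff_iff, decide_eq_true_eq, contains_shOf_iff d hnd k1 k2 h1 h2]
    rw [PySem.Set.len_eq]
    constructor
    · rintro ⟨ha, hb⟩
      exact ⟨by simpa using ha, by rw [← List.length_pos_iff]; omega⟩
    · rintro ⟨ha, hb⟩
      refine ⟨by simpa using ha, ?_⟩
      have := List.length_pos_iff.mpr hb
      omega
  rw [hfilter]
  apply List.map_congr_left
  intro k2 hk2
  obtain ⟨hk2m, hk2c⟩ := List.mem_filter.mp hk2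
  have hne : k1 ≠ k2 := ((contains_shOf_iff d hnd k1 k2 h1 hk2m).mp hk2c).1
  rw [sorted_R_eq_sorted_L d hnd k1 k2 h1 hk2m hne]

-- ===== VERDICT (by name: the statement is the Claim_ definition above) =====
theorem double_assignment_py_spec : Claim_equal_double_assignment_py := by
  intro d_syns _
  unfold Spec_double_assignment_py
  have eA : double_assignment_py d_syns =
      ((PySem.Dict.ofList d_syns).keys.foldl (fun errors k1 =>
        (PySem.Dict.ofList d_syns).keys.foldl (fun errors k2 =>
          if k1 == k2 then errors
          else if 0 < PySem.Set.len (PySem.Set.inter (PySem.Set.ofList ((PySem.Dict.ofList d_syns).getD k1 [])) (PySem.Set.ofList ((PySem.Dict.ofList d_syns).getD k2 []))) then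
            errors ++ [pvError (PySem.Dict.ofList d_syns) k1 k2 (PySem.List.sorted (PySem.Set.inter (PySem.Set.ofList ((PySem.Dict.ofList d_syns).getD k1 [])) (PySem.Set.ofList ((PySem.Dict.ofList d_syns).getD k2 []))) (fun x => x))]
          else errors) errors) [] : List String) := rfl
  have eB : double_assignment_py_alt d_syns =
      (PySem.Dict.ofList d_syns).keys.foldl (fun errors k1 =>
        (PySem.List.sorted ((byK1 (PySem.Dict.ofList d_syns)).getD k1 []) (fun k => (idxD (PySem.Dict.ofList d_syns)).getD k 0)).foldl (fun errors k2 =>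
          errors ++ [pvError (PySem.Dict.ofList d_syns) k1 k2 (PySem.List.sorted ((shOf (PySem.Dict.ofList d_syns)).getD (k1, k2) []) (fun x => x))]) errors) [] := rfl
  rw [eA, eB]
  exact main_aux2 (PySem.Dict.ofList d_syns) (PySem.Dict.nodup_keys_ofList d_syns)
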